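-- pv_equiv track=rewrite | github.com/yong-at-git/advent-of-code-2019 | days/day_1/day_1.py | get_complete_fuel_for_fuel
-- ===== SOURCE A (Python) =====
-- def get_base_fuel_for_mass(mass):
--     return mass // 3 - 2
--
-- def get_complete_fuel_for_fuel(fuel_mass):
--     additional_fuels = []
--
--     while fuel_mass > 0:
--         additional_fuel = get_base_fuel_for_mass(fuel_mass)
--         if additional_fuel > 0:
--             additional_fuels.append(additional_fuel)
--
--         fuel_mass = additional_fuel
--
--     return sum(additional_fuels)
-- ===== SOURCE B (Python) =====
-- def get_complete_fuel_for_fuel(fuel_mass):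
--     if fuel_mass <= 0:
--         return 0
--     f = fuel_mass // 3 - 2
--     if f <= 0:
--         return 0
--     return f + get_complete_fuel_for_fuel(f)
-- ===== Notes on version B (the rewrite author's own statement) =====
-- stated objective: simpler
-- what changed: Replaced the while loop that accumulates positive fuel amounts in a list and sums it with a direct self-recursion on the computed base fuel, inlining the helper.
import Mathlib
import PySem

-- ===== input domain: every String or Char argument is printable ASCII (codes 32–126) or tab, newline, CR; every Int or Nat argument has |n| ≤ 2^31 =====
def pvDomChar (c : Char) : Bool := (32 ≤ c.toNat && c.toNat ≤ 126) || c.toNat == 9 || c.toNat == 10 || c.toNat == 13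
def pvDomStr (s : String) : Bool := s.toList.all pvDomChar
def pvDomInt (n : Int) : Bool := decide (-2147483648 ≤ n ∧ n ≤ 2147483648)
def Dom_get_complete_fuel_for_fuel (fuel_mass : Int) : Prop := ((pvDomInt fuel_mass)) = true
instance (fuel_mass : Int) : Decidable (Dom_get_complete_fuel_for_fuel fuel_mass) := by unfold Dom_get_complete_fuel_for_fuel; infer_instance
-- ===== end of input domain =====

-- B replaces A's while-loop + accumulator list + final sum with a direct self-recursion
-- on the computed base fuel (objective: simpler).


-- ===== PORT A =====
-- termination helper for both ports: the next fuel value shrinks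
theorem pvFuelDec (m : Int) (hm : 0 < m) :
    (PySem.Int.floordiv m 3 - 2).toNat < m.toNat := by
  rw [PySem.Int.floordiv_eq_ediv_of_pos (by omega : (0:Int) < 3)]
  omega

def get_base_fuel_for_mass (mass : Int) : Int := PySem.Int.floordiv mass 3 - 2

-- the while loop of A, carrying the additional_fuels list
def pvLoopA (fuel_mass : Int) (additional_fuels : List Int) : List Int :=
  if h : fuel_mass > 0 then
    let additional_fuel := get_base_fuel_for_mass fuel_mass
    pvLoopA additional_fuel
      (additional_fuels ++ (if additional_fuel > 0 then [additional_fuel] else []))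
  else additional_fuels
termination_by fuel_mass.toNat
decreasing_by exact pvFuelDec fuel_mass h

def get_complete_fuel_for_fuel (fuel_mass : Int) : Int :=
  (pvLoopA fuel_mass []).sum

-- ===== PORT B =====
def get_complete_fuel_for_fuel_alt (fuel_mass : Int) : Int :=
  if h : fuel_mass ≤ 0 then 0
  else
    let f := PySem.Int.floordiv fuel_mass 3 - 2
    if f ≤ 0 then 0
    else f + get_complete_fuel_for_fuel_alt f
termination_by fuel_mass.toNat
decreasing_by exact pvFuelDec fuel_mass (by omega)

-- ===== PRECONDITION & SPEC =====
def Spec_get_complete_fuel_for_fuel (fuel_mass : Int) (out : Int) : Prop := out = get_complete_fuel_for_fuel_alt fuel_mass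
instance (fuel_mass : Int) (out : Int) : Decidable (Spec_get_complete_fuel_for_fuel fuel_mass out) := by unfold Spec_get_complete_fuel_for_fuel; infer_instance

-- ===== CLAIM (what is proved, stated in full; the proofs are below) =====
def Claim_equal_get_complete_fuel_for_fuel : Prop := ∀ (fuel_mass : Int), Dom_get_complete_fuel_for_fuel fuel_mass → Spec_get_complete_fuel_for_fuel fuel_mass (get_complete_fuel_for_fuel fuel_mass)

-- ===== LEMMAS AND PROOFS =====
theorem pvLoopA_sum (n : Nat) :
    ∀ (m : Int), m.toNat ≤ n → ∀ (acc : List Int),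
      (pvLoopA m acc).sum = acc.sum + get_complete_fuel_for_fuel_alt m := by
  induction n with
  | zero =>
    intro m hm acc
    have hm0 : ¬ m > 0 := by omega
    rw [pvLoopA, get_complete_fuel_for_fuel_alt]
    simp [hm0, show m ≤ 0 by omega]
  | succ n ih =>
    intro m hm acc
    by_cases hpos : m > 0
    · have hdec := pvFuelDec m hpos
      rw [pvLoopA, get_complete_fuel_for_fuel_alt]
      simp only [hpos, dif_pos, get_base_fuel_for_mass,
        show ¬ m ≤ 0 by omega, dite_false]
      set f := PySem.Int.floordiv m 3 - 2 with hf
      rw [ih f (by omega) _]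
      by_cases hfpos : f > 0
      · simp [hfpos, show ¬ f ≤ 0 by omega]; ring
      · have : get_complete_fuel_for_fuel_alt f = 0 := by
          rw [get_complete_fuel_for_fuel_alt]; simp [show f ≤ 0 by omega]
        simp [hfpos, show f ≤ 0 by omega, this]
    · rw [pvLoopA, get_complete_fuel_for_fuel_alt]
      simp [hpos, show m ≤ 0 by omega]

-- ===== VERDICT (by name: the statement is the Claim_ definition above) =====
theorem get_complete_fuel_for_fuel_spec : Claim_equal_get_complete_fuel_for_fuel := by
  intro m _
  unfold Spec_get_complete_fuel_for_fuel get_complete_fuel_for_fuel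
  simpa using pvLoopA_sum m.toNat m le_rfl []
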